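-- pv_equiv track=rewrite | github.com/petabytecat/code | math combonotoric/generalized_mathmatic_combo.py | solve_multiset_permutations
-- ===== SOURCE A (Python) =====
-- from math import factorial
-- from itertools import product
--
-- def solve_multiset_permutations(multiset, l):
--     counts = {}
--     for num in multiset:
--         counts[num] = counts.get(num, 0) + 1
--
--     distinct_elements = list(counts.keys())
--     multiplicities = list(counts.values())
--     n = len(distinct_elements)
--
--     possible_values = [range(min(m + 1, l + 1)) for m in multiplicities]
--
--     valid_combinations = [comb for comb in product(*possible_values) if sum(comb) == l]
--
--     total_permutations = 0
--     for comb in valid_combinations: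
--         numerator = factorial(l)
--         denominator = 1
--         for x in comb:
--             denominator *= factorial(x)
--         total_permutations += numerator // denominator
--
--     return total_permutations
-- ===== SOURCE B (Python) =====
-- from math import comb
--
-- def solve_multiset_permutations(multiset, l):
--     if l < 0 or l > len(multiset):
--         return 0
--     counts = {}
--     for num in multiset:
--         counts[num] = counts.get(num, 0) + 1
--     dp = [1] + [0] * l
--     for m in counts.values():
--         dp = [sum(dp[j - k] * comb(j, k) for k in range(min(m, j) + 1))
--               for j in range(l + 1)]
--     return dp[l]
-- ===== Notes on version B (the rewrite author's own statement) =====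
-- stated objective: faster
-- what changed: Replaced the exponential enumeration of the full Cartesian product of exponent tuples (filtering those summing to l and adding multinomials) by a dynamic program over exponential-generating-function style coefficients: dp[j] = number of length-j arrangements, updated per distinct element by dp'[j] = sum_k dp[j-k]*C(j,k).
import Mathlib
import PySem

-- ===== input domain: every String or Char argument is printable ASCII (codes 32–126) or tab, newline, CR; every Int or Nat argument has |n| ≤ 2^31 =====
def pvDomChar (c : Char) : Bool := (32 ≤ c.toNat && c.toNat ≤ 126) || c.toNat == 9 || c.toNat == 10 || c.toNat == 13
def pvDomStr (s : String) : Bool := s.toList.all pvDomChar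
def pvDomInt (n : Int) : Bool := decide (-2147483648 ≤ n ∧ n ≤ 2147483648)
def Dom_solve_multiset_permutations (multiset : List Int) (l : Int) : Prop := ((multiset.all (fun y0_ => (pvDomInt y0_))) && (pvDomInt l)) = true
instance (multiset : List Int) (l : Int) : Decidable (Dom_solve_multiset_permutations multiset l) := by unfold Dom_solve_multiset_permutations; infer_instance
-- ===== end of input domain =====

-- B replaces A's enumeration of all exponent tuples by a per-element DP on arrangement
-- counts per length (dp'[j] = sum_k dp[j-k]*C(j,k)); measured asymptotically faster.


-- ===== PORT A =====
-- math.factorial; A only ever applies it to nonnegative ints (range elements and, whenever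
-- any combination exists, l ≥ 0), so the toNat totalisation is exact on reachable calls.
def pyFactorial (n : Int) : Int := (Nat.factorial n.toNat : Int)

-- itertools.product(*lists) in its enumeration order (leftmost factor varies slowest)
def pyProd : List (List Int) → List (List Int)
  | [] => [[]]
  | xs :: rest => xs.flatMap (fun x => (pyProd rest).map (fun c => x :: c))

def solve_multiset_permutations (multiset : List Int) (l : Int) : Int :=
  let counts := multiset.foldl (fun d num => d.insert num (d.getD num 0 + 1)) PySem.Dict.empty
  let multiplicities := counts.values
  let possible_values := multiplicities.map (fun m => PySem.List.pyRange 0 (min (m + 1) (l + 1)) 1)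
  let valid_combinations := (pyProd possible_values).filter (fun comb => comb.sum == l)
  valid_combinations.foldl (fun total comb =>
    total + PySem.Int.floordiv (pyFactorial l) (comb.foldl (fun d x => d * pyFactorial x) 1)) 0

-- ===== PORT B =====
-- dp[j - k] and dp[l] are always in range (k ≤ j ≤ l < len dp), so List.getD is exact here.
def solve_multiset_permutations_alt (multiset : List Int) (l : Int) : Int :=
  if l < 0 ∨ (multiset.length : Int) < l then 0 else
    let counts := multiset.foldl (fun d num => d.insert num (d.getD num 0 + 1)) PySem.Dict.empty
    let dp := counts.values.foldl (fun dp m =>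
      (List.range (l.toNat + 1)).map (fun (j : Nat) =>
        ((List.range ((min m (j : Int) + 1).toNat)).map
          (fun k => dp.getD (j - k) 0 * (j.choose k : Int))).sum))
      (1 :: List.replicate l.toNat 0)
    dp.getD l.toNat 0

-- ===== PRECONDITION & SPEC =====
def Spec_solve_multiset_permutations (multiset : List Int) (l : Int) (out : Int) : Prop := out = solve_multiset_permutations_alt multiset l
instance (multiset : List Int) (l : Int) (out : Int) : Decidable (Spec_solve_multiset_permutations multiset l out) := by unfold Spec_solve_multiset_permutations; infer_instance

-- ===== CLAIM (what is proved, stated in full; the proofs are below) =====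
def Claim_equal_solve_multiset_permutations : Prop := ∀ (multiset : List Int) (l : Int), Dom_solve_multiset_permutations multiset l → Spec_solve_multiset_permutations multiset l (solve_multiset_permutations multiset l)

-- ===== LEMMAS AND PROOFS =====

-- common mathematical description: nWays ms j = number of length-j arrangements drawing at
-- most m_i copies of the i-th element (ms listed outermost-first)
def nWays : List Int → Nat → Int
  | [], j => if j = 0 then 1 else 0
  | m :: ms, j =>
      ((List.range (min m.toNat j + 1)).map (fun k => nWays ms (j - k) * (j.choose k : Int))).sum

-- A's denominator accumulator
def denomF (c : List Int) : Int := c.foldl (fun d x => d * pyFactorial x) 1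

theorem flatMap_single (ts : List Int) : ts.flatMap (fun x => [[x]]) = ts.map (fun t => [t]) := by
  induction ts with
  | nil => rfl
  | cons t ts ih => simp [ih]

theorem pyProd_append (rs : List (List Int)) (r : List Int) :
    pyProd (rs ++ [r]) = (pyProd rs).flatMap (fun c => r.map (fun t => c ++ [t])) := by
  induction rs with
  | nil => simp [pyProd, flatMap_single]
  | cons x xs ih => simp [pyProd, ih, List.map_flatMap, List.flatMap_assoc, List.flatMap_map, List.map_map, Function.comp_def, List.cons_append]

theorem mem_pyProd_nonneg (rs : List (List Int)) (h : ∀ r ∈ rs, ∀ x ∈ r, 0 ≤ x) :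
    ∀ c ∈ pyProd rs, ∀ x ∈ c, 0 ≤ x := by
  induction rs with
  | nil => intro c hc; simp [pyProd] at hc; simp [hc]
  | cons r rest ih =>
    intro c hc
    simp only [pyProd, List.mem_flatMap, List.mem_map] at hc
    obtain ⟨t, ht, c', hc', rfl⟩ := hc
    intro x hx
    rcases List.mem_cons.1 hx with rfl | hx
    · exact h r (by simp) x ht
    · exact ih (fun r hr => h r (by simp [hr])) c' hc' x hx

theorem foldl_mul_eq (f : Int → Int) (a : Int) (l : List Int) :
    l.foldl (fun d x => d * f x) a = a * (l.map f).prod := by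
  induction l generalizing a with
  | nil => simp
  | cons x xs ih => simp [List.foldl_cons, ih, mul_assoc]

theorem prod_fact_dvd (ns : List Nat) : (ns.map Nat.factorial).prod ∣ Nat.factorial ns.sum := by
  induction ns with
  | nil => simp
  | cons n ns ih =>
    simp only [List.map_cons, List.prod_cons, List.sum_cons]
    calc Nat.factorial n * (ns.map Nat.factorial).prod
        ∣ Nat.factorial n * Nat.factorial ns.sum := mul_dvd_mul_left _ ih
      _ ∣ Nat.factorial (n + ns.sum) := Nat.factorial_mul_factorial_dvd_factorial_add _ _

theorem sum_toNat (c : List Int) (h : ∀ x ∈ c, 0 ≤ x) :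
    c.sum = ((c.map Int.toNat).sum : Int) := by
  induction c with
  | nil => simp
  | cons x xs ih =>
    simp only [List.sum_cons, List.map_cons]
    rw [ih (fun y hy => h y (by simp [hy]))]
    have := h x (by simp)
    omega

-- the exact-division step: j!/(D·t!) = ((j-t)!/D)·C(j,t) when D ∣ (j-t)!
theorem term_div (j t D : Nat) (ht : t ≤ j) (hD : D ∣ Nat.factorial (j - t)) (hD0 : 0 < D) :
    Nat.factorial j / (D * Nat.factorial t) = Nat.factorial (j - t) / D * Nat.choose j t := by
  obtain ⟨E, hE⟩ := hD
  have h1 : Nat.factorial (j - t) / D = E := by rw [hE, Nat.mul_div_cancel_left _ hD0]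
  have h2 : Nat.choose j t * Nat.factorial t * Nat.factorial (j - t) = Nat.factorial j :=
    Nat.choose_mul_factorial_mul_factorial ht
  rw [h1]
  apply Nat.div_eq_of_eq_mul_left (by positivity)
  rw [← h2, hE]; ring

theorem sum_map_filter_eq {α : Type} (l : List α) (p : α → Bool) (f : α → Int) :
    ((l.filter p).map f).sum = (l.map (fun x => if p x then f x else 0)).sum := by
  induction l with
  | nil => simp
  | cons x xs ih => by_cases hx : p x <;> simp [hx, ih]

theorem list_sum_comm {α β : Type} (K : List α) (P : List β) (h : α → β → Int) :
    (K.map (fun k => (P.map (fun c => h k c)).sum)).sum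
      = (P.map (fun c => (K.map (fun k => h k c)).sum)).sum := by
  induction K with
  | nil => simp
  | cons k ks ih =>
    simp only [List.map_cons, List.sum_cons, ih, ← List.sum_map_add]

-- a 0/1-supported sum over range n picks out the unique index v satisfying the test
theorem sum_range_pick (n : Nat) (q : Nat → Bool) (g : Nat → Int) (v : Nat)
    (hv : ∀ k, k < n → (q k = true ↔ k = v)) :
    ((List.range n).map (fun k => if q k then g k else 0)).sum = if v < n then g v else 0 := by
  induction n with
  | zero => simp
  | succ n ih =>
    rw [List.range_succ, List.map_append, List.sum_append,
      ih (fun k hk => hv k (by omega))]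
    simp only [List.map_cons, List.map_nil, List.sum_cons, List.sum_nil, add_zero]
    by_cases hqn : q n = true
    · have hnv : n = v := (hv n (by omega)).1 hqn
      subst hnv
      simp [hqn]
    · have hvn : v ≠ n := fun h => hqn ((hv n (by omega)).2 h.symm)
      simp only [hqn, Bool.false_eq_true, if_false]
      split_ifs with h1 h2 <;> first | rfl | omega

theorem values_pos (multiset : List Int) :
    ∀ m ∈ (multiset.foldl (fun d num => d.insert num (d.getD num 0 + 1))
        (PySem.Dict.empty (κ := Int) (ν := Int))).values, 1 ≤ m := by
  intro m hm
  rw [PySem.Dict.foldl_insert_getD_add_one_eq_counter] at hm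
  rw [PySem.Dict.values_eq_map_keys _ (PySem.Dict.nodup_keys_counter _) 0] at hm
  simp only [List.mem_map] at hm
  obtain ⟨k, hk, rfl⟩ := hm
  rw [PySem.Dict.getD_counter]
  have hkm : k ∈ multiset := by
    rw [PySem.Dict.keys_counter] at hk
    exact (PySem.Set.mem_ofList _ _).1 hk
  have := List.count_pos_iff.2 hkm
  omega

theorem B_side (L : Nat) (vs : List Int) :
    (∀ m ∈ vs, 1 ≤ m) → ∀ j : Nat, j ≤ L →
    (vs.foldl (fun dp m =>
      (List.range (L + 1)).map (fun (j : Nat) =>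
        ((List.range ((min m (j : Int) + 1)).toNat).map
          (fun k => dp.getD (j - k) 0 * (j.choose k : Int))).sum))
      (1 :: List.replicate L 0)).getD j 0 = nWays vs.reverse j := by
  induction vs using List.reverseRecOn with
  | nil =>
    intro _ j hj
    cases j with
    | zero => simp [nWays]
    | succ k =>
      simp [nWays, List.getD_eq_getElem?_getD, List.getElem?_replicate]
      split_ifs <;> rfl
  | append_singleton vs m ih =>
    intro hvs j hj
    have hm : 1 ≤ m := hvs m (by simp)
    rw [List.foldl_append]
    simp only [List.foldl_cons, List.foldl_nil]
    rw [List.getD_eq_getElem?_getD, List.getElem?_map, List.getElem?_range (by omega)]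
    simp only [Option.map_some, Option.getD_some]
    have hmin : ((min m (j : Int)) + 1).toNat = min m.toNat j + 1 := by omega
    rw [hmin]
    have hcong : ∀ k ∈ List.range (min m.toNat j + 1),
        ((vs.foldl (fun dp m =>
          (List.range (L + 1)).map (fun (j : Nat) =>
            ((List.range ((min m (j : Int) + 1)).toNat).map
              (fun k => dp.getD (j - k) 0 * (j.choose k : Int))).sum))
          (1 :: List.replicate L 0)).getD (j - k) 0) * (j.choose k : Int)
          = nWays vs.reverse (j - k) * (j.choose k : Int) := by
      intro k hk
      rw [ih (fun x hx => hvs x (by simp [hx])) (j - k) (by omega)]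
    rw [List.map_congr_left hcong]
    simp [nWays, List.reverse_append]

theorem A_side (L : Nat) (vs : List Int) :
    (∀ m ∈ vs, 1 ≤ m) → ∀ j : Nat, j ≤ L →
    (((pyProd (vs.map (fun m : Int => PySem.List.pyRange 0 (min (m + 1) ((L : Int) + 1)) 1))).filter (fun c => c.sum == (j : Int))).map
      (fun c => PySem.Int.floordiv ((Nat.factorial j : Nat) : Int) (denomF c))).sum
      = nWays vs.reverse j := by
  induction vs using List.reverseRecOn with
  | nil =>
    intro _ j hj
    cases j with
    | zero => simp [pyProd, nWays, denomF]
    | succ k =>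
      have h0 : (((0 : Int)) == ((k : Int) + 1)) = false := by
        simp only [beq_eq_false_iff_ne, ne_eq]
        omega
      simp [pyProd, nWays, List.filter, h0]
  | append_singleton vs m ih =>
    intro hvs j hj
    have hm : 1 ≤ m := hvs m (by simp)
    have hvs' : ∀ x ∈ vs, 1 ≤ x := fun x hx => hvs x (by simp [hx])
    have hnnR : ∀ r ∈ vs.map (fun m : Int => PySem.List.pyRange 0 (min (m + 1) ((L : Int) + 1)) 1), ∀ x ∈ r, 0 ≤ x := by
      intro r hr x hx
      simp only [List.mem_map] at hr
      obtain ⟨mm, _, rfl⟩ := hr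
      exact ((PySem.List.mem_pyRange_one).1 hx).1
    have hnnP : ∀ c ∈ pyProd (vs.map (fun m : Int => PySem.List.pyRange 0 (min (m + 1) ((L : Int) + 1)) 1)), ∀ x ∈ c, 0 ≤ x :=
      mem_pyProd_nonneg _ hnnR
    -- LHS: peel the last factor of the Cartesian product
    rw [List.map_append, List.map_singleton, pyProd_append, sum_map_filter_eq,
      List.map_flatMap, List.flatMap_def, List.sum_flatten, List.map_map]
    -- RHS: unfold one level of nWays and rewrite the inner counts with the IH
    rw [List.reverse_append, List.reverse_singleton, List.singleton_append]
    show _ = nWays (m :: vs.reverse) j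
    rw [nWays]
    have hK : ∀ k ∈ List.range (min m.toNat j + 1),
        nWays vs.reverse (j - k) * ((j.choose k : Nat) : Int)
        = ((pyProd (vs.map (fun m : Int => PySem.List.pyRange 0 (min (m + 1) ((L : Int) + 1)) 1))).map (fun c =>
            (if c.sum == ((j - k : Nat) : Int)
              then PySem.Int.floordiv ((Nat.factorial (j - k) : Nat) : Int) (denomF c)
              else 0) * ((j.choose k : Nat) : Int))).sum := by
      intro k hk
      rw [← ih hvs' (j - k) (by omega), sum_map_filter_eq, List.sum_map_mul_right]
    rw [List.map_congr_left hK, list_sum_comm]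
    -- pointwise over the combinations of the first factors
    apply congrArg
    apply List.map_congr_left
    intro c hc
    simp only [Function.comp_apply, List.map_map, Function.comp_def]
    have hnn : ∀ x ∈ c, 0 ≤ x := hnnP c hc
    have hs : c.sum = (((c.map Int.toNat).sum : Nat) : Int) := sum_toNat c hnn
    set s : Nat := (c.map Int.toNat).sum with hsdef
    set D : Nat := ((c.map Int.toNat).map Nat.factorial).prod with hDdef
    have hD0 : 0 < D := List.prod_pos (by
      intro a ha
      simp only [List.mem_map] at ha
      obtain ⟨b, _, rfl⟩ := ha
      exact Nat.factorial_pos b)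
    have hDdvd : D ∣ Nat.factorial s := prod_fact_dvd _
    have hden : denomF c = (D : Int) := by
      rw [denomF, foldl_mul_eq, one_mul, hDdef]
      have h1 : c.map pyFactorial
          = (c.map Int.toNat).map (fun n => ((Nat.factorial n : Nat) : Int)) := by
        simp [pyFactorial, List.map_map, Function.comp_def]
      rw [h1, Nat.cast_list_prod, List.map_map]
      simp [Function.comp_def]
    -- evaluate the inner sum on each side via the unique index the test picks
    have hdapp : ∀ t : Int, denomF (c ++ [t]) = denomF c * pyFactorial t := by
      intro t; simp [denomF, List.foldl_append]
    -- LHS inner sum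
    have hL : ((PySem.List.pyRange 0 (min (m + 1) ((L : Int) + 1)) 1).map (fun t =>
        if (c ++ [t]).sum == (j : Int)
          then PySem.Int.floordiv ((Nat.factorial j : Nat) : Int) (denomF (c ++ [t]))
          else 0)).sum
        = (if (s ≤ j ∧ j - s ≤ m.toNat)
            then ((Nat.factorial j / (D * Nat.factorial (j - s)) : Nat) : Int) else 0) := by
      rw [PySem.List.pyRange_one]
      simp only [List.map_map, Function.comp_def, zero_add, sub_zero]
      have hcongr : ∀ k ∈ List.range ((min (m + 1) ((L : Int) + 1)).toNat),
          (if (c ++ [(k : Int)]).sum == (j : Int)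
            then PySem.Int.floordiv ((Nat.factorial j : Nat) : Int) (denomF (c ++ [(k : Int)]))
            else 0)
          = (if ((s : Int) + (k : Int) == (j : Int))
              then ((Nat.factorial j / (D * Nat.factorial k) : Nat) : Int) else 0) := by
        intro k _
        rw [hdapp, hden, List.sum_append, List.sum_singleton, hs]
        have hpf : pyFactorial (k : Int) = ((Nat.factorial k : Nat) : Int) := by
          simp [pyFactorial]
        rw [hpf, ← Nat.cast_mul, PySem.Int.floordiv_natCast]
      rw [List.map_congr_left hcongr]
      by_cases hcase : s ≤ j ∧ j - s ≤ m.toNat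
      · rw [sum_range_pick _ _ _ (j - s)
          (by intro k hk; rw [beq_iff_eq]; constructor <;> intro h <;> omega)]
        rw [if_pos (by omega), if_pos hcase]
      · rw [sum_range_pick _ _ _ ((min (m + 1) ((L : Int) + 1)).toNat)
          (by intro k hk; rw [beq_iff_eq]; constructor <;> intro h <;> omega)]
        rw [if_neg (by omega), if_neg hcase]
    -- RHS inner sum
    have hR : ((List.range (min m.toNat j + 1)).map (fun k =>
        (if c.sum == ((j - k : Nat) : Int)
          then PySem.Int.floordiv ((Nat.factorial (j - k) : Nat) : Int) (denomF c)
          else 0) * ((j.choose k : Nat) : Int))).sum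
        = (if (s ≤ j ∧ j - s ≤ m.toNat)
            then ((Nat.factorial s / D : Nat) : Int) * ((j.choose (j - s) : Nat) : Int)
            else 0) := by
      have hcongr : ∀ k ∈ List.range (min m.toNat j + 1),
          (if c.sum == ((j - k : Nat) : Int)
            then PySem.Int.floordiv ((Nat.factorial (j - k) : Nat) : Int) (denomF c)
            else 0) * ((j.choose k : Nat) : Int)
          = (if ((s : Int) == ((j - k : Nat) : Int))
              then ((Nat.factorial (j - k) / D : Nat) : Int) * ((j.choose k : Nat) : Int)
              else 0) := by
        intro k _
        rw [hs, hden, PySem.Int.floordiv_natCast]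
        split_ifs <;> simp
      rw [List.map_congr_left hcongr]
      by_cases hcase : s ≤ j ∧ j - s ≤ m.toNat
      · rw [sum_range_pick _ _ _ (j - s)
          (by intro k hk; rw [beq_iff_eq]; constructor <;> intro h <;> omega)]
        rw [if_pos (by omega), if_pos hcase, show j - (j - s) = s by omega]
      · rw [sum_range_pick _ _ _ (min m.toNat j + 1)
          (by intro k hk; rw [beq_iff_eq]; constructor <;> intro h <;> omega)]
        rw [if_neg (by omega), if_neg hcase]
    rw [hL, hR]
    -- the two closed forms agree by the exact-division identity
    split_ifs with h1
    · rw [term_div j (j - s) D (by omega) (by rw [show j - (j - s) = s by omega]; exact hDdvd) hD0,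
        show j - (j - s) = s by omega]
      push_cast
      ring
    · rfl

theorem sum_ite_count (d : List Int) (y : Int) :
    (d.map (fun k => if y == k then (1 : Nat) else 0)).sum = d.count y := by
  induction d with
  | nil => simp
  | cons a d ih =>
    simp only [List.map_cons, List.sum_cons, List.count_cons, beq_iff_eq] at *
    by_cases h : a = y <;> simp [h, ih] <;> omega

theorem sum_counts (d : List Int) (xs : List Int) (hd : d.Nodup) (hx : ∀ x ∈ xs, x ∈ d) :
    (d.map (fun k => xs.count k)).sum = xs.length := by
  induction xs with
  | nil => simp
  | cons y ys ih =>
    have h1 : ∀ k ∈ d, (y :: ys).count k = ys.count k + (if y == k then 1 else 0) := by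
      intro k _
      rw [List.count_cons]
    rw [List.map_congr_left h1, List.sum_map_add,
      ih (fun x hxx => hx x (List.mem_cons_of_mem _ hxx)), sum_ite_count]
    have hy : d.count y = 1 :=
      le_antisymm (List.nodup_iff_count_le_one.1 hd y)
        (List.count_pos_iff.2 (hx y (List.mem_cons_self)))
    simp [hy]

theorem values_sum (multiset : List Int) :
    (((multiset.foldl (fun d num => d.insert num (d.getD num 0 + 1))
        (PySem.Dict.empty : PySem.Dict Int Int)).values).map Int.toNat).sum
      = multiset.length := by
  rw [PySem.Dict.foldl_insert_getD_add_one_eq_counter,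
    PySem.Dict.values_eq_map_keys _ (PySem.Dict.nodup_keys_counter _) 0,
    PySem.Dict.keys_counter, List.map_map]
  have h1 : ∀ k ∈ PySem.Set.ofList multiset,
      (Int.toNat ∘ fun k => (PySem.Dict.counter multiset).getD k 0) k = multiset.count k := by
    intro k _
    simp [PySem.Dict.getD_counter]
  rw [List.map_congr_left h1]
  exact sum_counts _ _ (PySem.Set.nodup_ofList _)
    (fun x hxx => (PySem.Set.mem_ofList _ _).2 hxx)

theorem nWays_zero (vs : List Int) (j : Nat) (h : (vs.map Int.toNat).sum < j) :
    nWays vs j = 0 := by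
  induction vs generalizing j with
  | nil =>
    rw [nWays]
    simp only [List.map_nil, List.sum_nil] at h
    rw [if_neg (by omega)]
  | cons m ms ih =>
    rw [nWays]
    have hz : ∀ k ∈ List.range (min m.toNat j + 1),
        nWays ms (j - k) * ((j.choose k : Nat) : Int) = 0 * ((j.choose k : Nat) : Int) := by
      intro k hk
      simp only [List.mem_range] at hk
      rw [ih (j - k) (by simp only [List.map_cons, List.sum_cons] at h; omega)]
    rw [List.map_congr_left hz]
    simp

-- ===== VERDICT (by name: the statement is the Claim_ definition above) =====
theorem solve_multiset_permutations_spec : Claim_equal_solve_multiset_permutations := by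
  intro multiset l _
  unfold Spec_solve_multiset_permutations
  by_cases hl : l < 0
  · rw [solve_multiset_permutations_alt, if_pos (Or.inl hl), solve_multiset_permutations]
    cases hv : (multiset.foldl (fun d num => d.insert num (d.getD num 0 + 1))
        (PySem.Dict.empty : PySem.Dict Int Int)).values with
    | nil =>
      have h0 : (((0 : Int)) == l) = false := by
        simp only [beq_eq_false_iff_ne, ne_eq]; omega
      simp [pyProd, List.filter, h0]
    | cons v rest =>
      have hr : PySem.List.pyRange 0 (min v l + 1) 1 = [] :=
        PySem.List.pyRange_one_eq_nil (by omega)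
      simp [pyProd, hr]
  · obtain ⟨L, rfl⟩ : ∃ L : Nat, l = (L : Int) := ⟨l.toNat, (Int.toNat_of_nonneg (by omega)).symm⟩
    have hA := A_side L (multiset.foldl (fun d num => d.insert num (d.getD num 0 + 1))
        PySem.Dict.empty).values (values_pos multiset) L le_rfl
    simp only [denomF] at hA
    have hpf : pyFactorial ((L : Int)) = ((Nat.factorial L : Nat) : Int) := by
      simp [pyFactorial]
    by_cases hbig : (multiset.length : Int) < (L : Int)
    · rw [solve_multiset_permutations_alt, if_pos (Or.inr hbig), solve_multiset_permutations]
      rw [PySem.List.foldl_add, zero_add, hpf, hA]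
      apply nWays_zero
      rw [List.map_reverse, List.sum_reverse]
      have := values_sum multiset
      omega
    · rw [solve_multiset_permutations, solve_multiset_permutations_alt,
        if_neg (by rintro (h | h) <;> omega)]
      simp only [Int.toNat_natCast]
      have hB := B_side L (multiset.foldl (fun d num => d.insert num (d.getD num 0 + 1))
          PySem.Dict.empty).values (values_pos multiset) L le_rfl
      rw [PySem.List.foldl_add, zero_add]
      rw [hpf, hA, ← hB]
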